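-- pv_equiv track=rewrite | github.com/addtheletters/HS-AI | school/genetic1.py | sortOnFitness
-- ===== SOURCE A (Python) =====
-- def fitnessFunc( gene ):
--     fitval = 0
--     for item in gene:
--         if item == '1':
--             fitval += 1
--     return fitval
--
-- def sortOnFitness( genes ):
--   fitnesses = [0] * len(genes)
--   for i in range(len(genes)):
--     fitnesses[i] = fitnessFunc(genes[i])
--   ssorted = []
--   while max(fitnesses) > 0:
--     ind = fitnesses.index(max(fitnesses))
--     ssorted.append( genes[ind] )
--     fitnesses[ind] = -1
--   return ssorted
-- ===== SOURCE B (Python) =====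
-- def sortOnFitness(genes):
--     fits = [sum(c == '1' for c in g) for g in genes]
--     maxf = max(fits)
--     out = []
--     for k in range(maxf, 0, -1):
--         out.extend(g for g, f in zip(genes, fits) if f == k)
--     return out
-- ===== Notes on version B (the rewrite author's own statement) =====
-- stated objective: alternative
-- what changed: A repeatedly rescans the fitness list for its maximum, emits that gene and marks it -1 (destructive selection sort); B computes the fitness list once and, for each fitness level from max(fitnesses) down to 1, collects the genes of that fitness in original order, concatenating the groups.
import Mathlib
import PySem

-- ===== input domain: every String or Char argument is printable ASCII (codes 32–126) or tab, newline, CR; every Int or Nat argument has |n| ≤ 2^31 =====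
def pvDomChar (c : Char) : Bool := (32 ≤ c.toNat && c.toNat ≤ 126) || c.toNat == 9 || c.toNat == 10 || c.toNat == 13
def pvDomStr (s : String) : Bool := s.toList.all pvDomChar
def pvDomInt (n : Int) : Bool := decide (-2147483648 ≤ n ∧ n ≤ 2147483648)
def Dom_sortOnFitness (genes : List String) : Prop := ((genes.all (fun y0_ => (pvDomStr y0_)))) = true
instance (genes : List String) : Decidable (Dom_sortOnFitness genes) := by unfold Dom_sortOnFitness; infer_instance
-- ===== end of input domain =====

-- B replaces A's destructive select-the-max-and-mark loop by one group-by-fitness pass per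
-- fitness level, scanned from max(fitnesses) down to 1 (objective: simpler; not claimed faster).

-- ===== PORT A =====
def fitnessFunc (gene : String) : Int :=
  gene.toList.foldl (fun fitval item => if item = '1' then fitval + 1 else fitval) 0

-- the 'while max(fitnesses) > 0' loop; fuel = len(fitnesses) bounds the iteration count
-- (each pass sets one positive entry to -1); the unreachable fallbacks return the current acc
def sortLoop (fuel : Nat) (genes : List String) (fits : List Int) (acc : List String) :
    List String :=
  match fuel with
  | 0 => acc
  | fuel + 1 =>
    match PySem.List.max? fits (fun x => x) with
    | none => acc
    | some m =>
      if 0 < m then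
        match PySem.List.index? fits m with
        | none => acc  -- unreachable: m ∈ fits
        | some ind =>
          sortLoop fuel genes (fits.set ind (-1)) (acc ++ [genes.getD ind ""])
      else acc

def sortOnFitness (genes : List String) : List String :=
  let fits := genes.map fitnessFunc
  sortLoop fits.length genes fits []

-- ===== PORT B =====
def fitnessFunc_alt (gene : String) : Int :=
  (gene.toList.count '1' : Int)   -- sum(c == '1' for c in g)

def sortOnFitness_alt (genes : List String) : List String :=
  let fits := genes.map fitnessFunc_alt
  match PySem.List.max? fits (fun x => x) with
  | none => []   -- Python: max([]) raises ValueError; excluded by Pre_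
  | some maxf =>
    (PySem.List.pyRange maxf 0 (-1)).foldl
      (fun out k => out ++ ((genes.zip fits).filter (fun p => p.2 = k)).map Prod.fst) []

-- ===== PRECONDITION & SPEC =====
-- Pre_ excludes only the empty list, on which both A and B raise ValueError (max of empty sequence).
def Pre_sortOnFitness (genes : List String) : Prop := genes ≠ []
instance (genes : List String) : Decidable (Pre_sortOnFitness genes) := by
  unfold Pre_sortOnFitness; infer_instance
def pvWitness_sortOnFitness : List String := ["101", "0", "11"]

def Spec_sortOnFitness (genes : List String) (out : List String) : Prop := out = sortOnFitness_alt genes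
instance (genes : List String) (out : List String) : Decidable (Spec_sortOnFitness genes out) := by unfold Spec_sortOnFitness; infer_instance

-- ===== CLAIM (what is proved, stated in full; the proofs are below) =====
def Claim_equal_sortOnFitness : Prop := ∀ (genes : List String), Dom_sortOnFitness genes → Pre_sortOnFitness genes → Spec_sortOnFitness genes (sortOnFitness genes)

-- ===== LEMMAS AND PROOFS =====

-- the genes of l whose fitness equals k, in order
def filt (l : List (String × Int)) (k : Int) : List String :=
  (l.filter (fun p => p.2 = k)).map Prod.fst

-- concatenation of the fitness groups m, m-1, …, 1
def levels : Nat → List (String × Int) → List String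
  | 0, _ => []
  | m + 1, l => filt l ((m : Int) + 1) ++ levels m l

theorem fit_aux (l : List Char) (x : Int) :
    l.foldl (fun a c => if c = '1' then a + 1 else a) x = x + (l.count '1' : Int) := by
  induction l generalizing x with
  | nil => simp
  | cons c t ih =>
    simp only [List.foldl_cons, ih, List.count_cons]
    by_cases h : c = '1' <;> simp [h] <;> push_cast <;> ring

theorem fit_eq (g : String) : fitnessFunc g = fitnessFunc_alt g := by
  simp [fitnessFunc, fitnessFunc_alt, fit_aux]

theorem fit_nonneg (g : String) : 0 ≤ fitnessFunc g := by
  simp [fit_eq, fitnessFunc_alt]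

theorem filt_nil_of_pos (l : List (String × Int)) (k : Int)
    (hub : ∀ p ∈ l, p.2 ≤ 0) (hk : 0 < k) : filt l k = [] := by
  simp only [filt, List.map_eq_nil_iff, List.filter_eq_nil_iff]
  intro p hp h
  have := hub p hp
  simp at h
  omega

theorem levels_nil_of_nonpos (m : Nat) (l : List (String × Int))
    (hub : ∀ p ∈ l, p.2 ≤ 0) : levels m l = [] := by
  induction m with
  | zero => rfl
  | succ m ih =>
    simp only [levels, ih, List.append_nil]
    exact filt_nil_of_pos l _ hub (by omega)

theorem levels_congr (m : Nat) (l l' : List (String × Int))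
    (h : ∀ k : Int, 1 ≤ k → k ≤ (m : Int) → filt l k = filt l' k) :
    levels m l = levels m l' := by
  induction m with
  | zero => rfl
  | succ m ih =>
    simp only [levels]
    rw [h ((m : Int) + 1) (by omega) (by push_cast; omega),
        ih (fun k h1 h2 => h k h1 (by push_cast at h2 ⊢; omega))]

theorem filt_decomp (pre suf : List (String × Int)) (g : String) (v k : Int) :
    filt (pre ++ (g, v) :: suf) k
      = filt pre k ++ (if v = k then [g] else []) ++ filt suf k := by
  by_cases h : v = k <;> simp [filt, h]

-- removing the first occurrence of the maximal fitness mx pulls its gene to the front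
theorem levels_ins (m : Nat) (pre suf : List (String × Int)) (g : String) (mx : Int)
    (hpos : 0 < mx) (hle : mx ≤ (m : Int))
    (hub : ∀ p ∈ pre ++ (g, mx) :: suf, p.2 ≤ mx)
    (hpre : ∀ p ∈ pre, p.2 ≠ mx) :
    levels m (pre ++ (g, mx) :: suf) = g :: levels m (pre ++ (g, -1) :: suf) := by
  induction m with
  | zero => omega
  | succ m ih =>
    simp only [levels]
    by_cases hmx : mx = (m : Int) + 1
    · -- top level: the filter at mx loses exactly its first element (g)
      subst hmx
      have hprenil : filt pre ((m : Int) + 1) = [] := by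
        simp only [filt, List.map_eq_nil_iff, List.filter_eq_nil_iff]
        intro p hp h; have := hpre p hp; simp at h; omega
      have h1 : filt (pre ++ (g, (m : Int) + 1) :: suf) ((m : Int) + 1) =
          g :: filt suf ((m : Int) + 1) := by
        rw [filt_decomp]; simp [hprenil]
      have h2 : filt (pre ++ (g, -1) :: suf) ((m : Int) + 1) =
          filt suf ((m : Int) + 1) := by
        rw [filt_decomp]; simp [hprenil]; omega
      have h3 : levels m (pre ++ (g, (m : Int) + 1) :: suf) = levels m (pre ++ (g, -1) :: suf) := by
        apply levels_congr
        intro k hk1 hk2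
        rw [filt_decomp, filt_decomp]
        have hx1 : ¬ ((m : Int) + 1 = k) := by omega
        have hx2 : ¬ ((-1 : Int) = k) := by omega
        simp [hx1, hx2]
      rw [h1, h2, h3]
      simp
    · -- the top level is empty on both sides; recurse
      have he1 : filt (pre ++ (g, mx) :: suf) ((m : Int) + 1) = [] := by
        simp only [filt, List.map_eq_nil_iff, List.filter_eq_nil_iff]
        intro p hp h; have := hub p hp; simp at h; omega
      have he2 : filt (pre ++ (g, -1) :: suf) ((m : Int) + 1) = [] := by
        simp only [filt, List.map_eq_nil_iff, List.filter_eq_nil_iff]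
        intro p hp h
        have hple : p.2 ≤ mx := by
          rcases List.mem_append.1 hp with hL | hR
          · exact hub p (List.mem_append_left _ hL)
          · rcases List.mem_cons.1 hR with he | ht
            · rw [he]; simp; omega
            · exact hub p (List.mem_append_right _ (List.mem_cons_of_mem _ ht))
        simp at h; omega
      rw [he1, he2]
      simp only [List.nil_append]
      exact ih (by push_cast at hle ⊢; omega)

-- the zip of genes with fits.set ind (-1), decomposed
theorem zip_set_decomp (genes : List String) (fits : List Int) (ind : Nat)
    (hlen : fits.length = genes.length) (hind : ind < fits.length) :
    genes.zip (fits.set ind (-1))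
      = (genes.zip fits).take ind ++ (genes.getD ind "", -1) :: (genes.zip fits).drop (ind + 1) := by
  induction genes generalizing fits ind with
  | nil => simp at hlen; simp [hlen] at hind
  | cons gh gt ih =>
    cases fits with
    | nil => simp at hind
    | cons fh ft =>
      cases ind with
      | zero => simp
      | succ n =>
        simp only [List.set_cons_succ, List.zip_cons_cons, List.take_succ_cons,
          List.drop_succ_cons, List.getD_cons_succ, List.cons_append]
        congr 1
        exact ih ft n (by simpa using hlen) (by simpa using hind)

theorem zip_decomp (genes : List String) (fits : List Int) (ind : Nat)
    (hlen : fits.length = genes.length) (hind : ind < fits.length) :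
    genes.zip fits
      = (genes.zip fits).take ind ++ (genes.getD ind "", fits[ind]'hind) :: (genes.zip fits).drop (ind + 1) := by
  induction genes generalizing fits ind with
  | nil => simp at hlen; simp [hlen] at hind
  | cons gh gt ih =>
    cases fits with
    | nil => simp at hind
    | cons fh ft =>
      cases ind with
      | zero => simp
      | succ n =>
        simp only [List.zip_cons_cons, List.take_succ_cons, List.drop_succ_cons,
          List.getD_cons_succ, List.getElem_cons_succ, List.cons_append]
        congr 1
        exact ih ft n (by simpa using hlen) (by simpa using hind)

theorem countP_pos_set (fits : List Int) (ind : Nat) (hind : ind < fits.length)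
    (hpos : 0 < fits[ind]'hind) :
    (fits.set ind (-1)).countP (fun x => decide (0 < x)) + 1
      = fits.countP (fun x => decide (0 < x)) := by
  induction fits generalizing ind with
  | nil => simp at hind
  | cons h t ih =>
    cases ind with
    | zero =>
      simp only [List.getElem_cons_zero] at hpos
      simp only [List.set_cons_zero, List.countP_cons]
      have h1 : decide (0 < h) = true := by simpa using hpos
      simp [h1]
    | succ n =>
      simp only [List.getElem_cons_succ] at hpos
      have := ih n (by simpa using hind) hpos
      simp only [List.set_cons_succ, List.countP_cons]
      omega

-- main loop invariant: with enough fuel and an upper bound m on all fitnesses,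
-- A's selection loop produces the descending fitness groups
theorem sortLoop_levels (fuel : Nat) (genes : List String) (fits : List Int)
    (acc : List String) (m : Nat)
    (hlen : fits.length = genes.length)
    (hfuel : fits.countP (fun x => decide (0 < x)) ≤ fuel)
    (hub : ∀ x ∈ fits, x ≤ (m : Int)) :
    sortLoop fuel genes fits acc = acc ++ levels m (genes.zip fits) := by
  induction fuel generalizing fits acc with
  | zero =>
    have h0 : fits.countP (fun x => decide (0 < x)) = 0 := by omega
    have hall : ∀ x ∈ fits, x ≤ 0 := by
      intro x hx
      have := List.countP_eq_zero.1 h0 x hx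
      simp at this; omega
    have : levels m (genes.zip fits) = [] := by
      apply levels_nil_of_nonpos
      intro p hp
      exact hall p.2 (List.of_mem_zip hp).2
    simp [sortLoop, this]
  | succ fuel ih =>
    rw [sortLoop]
    cases hmax : PySem.List.max? fits (fun x => x) with
    | none =>
      have : fits = [] := by
        have := PySem.List.max?_eq_none_iff (xs := fits) (key := fun x => x)
        tauto
      subst this
      have hz : genes.zip ([] : List Int) = [] := List.zip_nil_right
      rw [hz, levels_nil_of_nonpos m [] (by simp)]
      simp
    | some mx =>
      have hmem : mx ∈ fits := PySem.List.max?_mem hmax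
      have hmx_ub : ∀ y ∈ fits, y ≤ mx := by
        intro y hy; exact PySem.List.max?_isMax hmax y hy
      by_cases hpos : 0 < mx
      · simp only [hpos, if_true]
        cases hidx : PySem.List.index? fits mx with
        | none =>
          exfalso
          have := (PySem.List.index?_isSome_iff (xs := fits) (v := mx)).2 hmem
          rw [hidx] at this; simp at this
        | some ind =>
          obtain ⟨hind, hval, hfirst⟩ := PySem.List.getElem_of_index?_eq_some hidx
          -- recurse via the invariant
          change sortLoop fuel genes (fits.set ind (-1)) (acc ++ [genes.getD ind ""]) = _
          rw [ih (fits.set ind (-1)) (acc ++ [genes.getD ind ""])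
              (by simpa using hlen)
              (by have := countP_pos_set fits ind hind (by rw [hval]; exact hpos); omega)
              (by intro x hx
                  rcases List.mem_or_eq_of_mem_set hx with h | h
                  · exact hub x h
                  · have : (0:Int) ≤ (m:Int) := by positivity
                    omega)]
          -- and show: levels m (zip fits) = genes[ind] :: levels m (zip fits')
          have hzs := zip_set_decomp genes fits ind hlen hind
          have hzip := zip_decomp genes fits ind hlen hind
          rw [hval] at hzip
          rw [hzs]
          conv_rhs => rw [hzip]
          rw [levels_ins m _ _ _ mx hpos
              (by have := hub mx hmem; omega)
              (by intro p hp
                  rw [← hzip] at hp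
                  exact hmx_ub p.2 (List.of_mem_zip hp).2)
              (by intro p hp
                  rw [List.mem_take_iff_getElem] at hp
                  obtain ⟨j, hj, hpj⟩ := hp
                  have hjind : j < ind := by
                    simp only [lt_min_iff] at hj; exact hj.1
                  have hjlen : j < fits.length := by omega
                  have : p.2 = fits[j]'hjlen := by
                    rw [← hpj]
                    simp [List.getElem_zip]
                  rw [this]
                  exact hfirst j hjind)]
          simp
      · simp only [hpos, if_false]
        have : levels m (genes.zip fits) = [] := by
          apply levels_nil_of_nonpos
          intro p hp
          have := hmx_ub p.2 (List.of_mem_zip hp).2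
          omega
        simp [this]

-- B's countdown foldl is the same descending concatenation of fitness groups
theorem flat_levels (l : List (String × Int)) (m : Nat) :
    (PySem.List.pyRange (m : Int) 0 (-1)).foldl
        (fun out k => out ++ (l.filter (fun p => p.2 = k)).map Prod.fst) []
      = levels m l := by
  rw [PySem.List.foldl_append_eq_flatMap]
  simp only [List.nil_append]
  induction m with
  | zero => simp [PySem.List.pyRange_neg_one_eq_nil le_rfl, levels]
  | succ m ih =>
    have hc : ((m + 1 : Nat) : Int) = (m : Int) + 1 := by push_cast; ring
    rw [hc, PySem.List.pyRange_neg_one_cons (by omega)]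
    simp only [List.flatMap_cons, levels]
    rw [show (m : Int) + 1 - 1 = (m : Int) by ring, ih]
    rfl

-- ===== VERDICT (by name: the statement is the Claim_ definition above) =====
theorem sortOnFitness_spec : Claim_equal_sortOnFitness := by
  intro genes _ hpre
  unfold Spec_sortOnFitness sortOnFitness sortOnFitness_alt
  have hmapeq : genes.map fitnessFunc_alt = genes.map fitnessFunc :=
    List.map_congr_left (fun g _ => (fit_eq g).symm)
  rw [hmapeq]
  set fits := genes.map fitnessFunc with hfits
  have hne : fits ≠ [] := by simp [hfits, Pre_sortOnFitness] at hpre ⊢; exact hpre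
  cases hmax : PySem.List.max? fits (fun x => x) with
  | none =>
    exfalso
    exact hne ((PySem.List.max?_eq_none_iff fits (fun x => x)).1 hmax)
  | some mx =>
    have hmem : mx ∈ fits := PySem.List.max?_mem hmax
    have hmx0 : 0 ≤ mx := by
      obtain ⟨g, _, hg⟩ := List.mem_map.1 hmem
      rw [← hg]; exact fit_nonneg g
    have hcast : ((mx.toNat : Nat) : Int) = mx := Int.toNat_of_nonneg hmx0
    simp only [hmax]
    rw [sortLoop_levels fits.length genes fits [] mx.toNat
        (by simp [hfits])
        List.countP_le_length
        (by intro x hx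
            have := PySem.List.max?_isMax hmax x hx
            simpa [hcast] using this)]
    conv_rhs => rw [← hcast]
    rw [flat_levels (genes.zip fits) mx.toNat]
    simp
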